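-- pv_equiv track=rewrite | github.com/Perviz021/quiz-app | backend/scripts/generate_protocol_excel.py | split_score_with_zero
-- ===== SOURCE A (Python) =====
-- def split_score_with_zero(score):
--     parts = []
--     remaining = int(score)
--     for _ in range(5):
--         if remaining >= 10:
--             parts.append(10);
--             remaining -= 10;
--         elif remaining > 0:
--             parts.append(remaining);
--             remaining = 0;
--         else:
--             parts.append(0);
--     return parts;
-- ===== SOURCE B (Python) =====
-- def split_score_with_zero(score):
--     s = int(score)
--     return [max(0, min(10, s - 10 * i)) for i in range(5)]
-- ===== Notes on version B (the rewrite author's own statement) =====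
-- stated objective: simpler
-- what changed: Replaces the running 'remaining' accumulator loop by a closed-form comprehension computing each bucket independently as max(0, min(10, s - 10*i)).
import Mathlib
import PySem

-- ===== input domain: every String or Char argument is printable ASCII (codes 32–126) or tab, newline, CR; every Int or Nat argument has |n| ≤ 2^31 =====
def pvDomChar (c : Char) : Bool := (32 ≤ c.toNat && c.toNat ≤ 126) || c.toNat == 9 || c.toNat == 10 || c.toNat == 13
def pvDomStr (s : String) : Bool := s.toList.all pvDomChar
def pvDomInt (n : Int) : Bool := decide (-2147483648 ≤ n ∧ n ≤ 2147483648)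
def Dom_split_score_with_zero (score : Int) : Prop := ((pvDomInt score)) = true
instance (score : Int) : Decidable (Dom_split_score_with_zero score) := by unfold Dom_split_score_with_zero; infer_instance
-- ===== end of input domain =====

-- B replaces A's running 'remaining' accumulator with a closed-form bucket formula; objective: simpler.

-- ===== PORT A =====
-- one iteration of A's loop body over the state (parts, remaining)
def pvStepA (st : List Int × Int) : List Int × Int :=
  let parts := st.1
  let remaining := st.2
  if remaining ≥ 10 then (parts ++ [10], remaining - 10)
  else if remaining > 0 then (parts ++ [remaining], 0)
  else (parts ++ [0], remaining)

def split_score_with_zero (score : Int) : List Int :=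
  ((PySem.List.pyRange 0 5 1).foldl (fun st _ => pvStepA st) ([], score)).1

-- ===== PORT B =====
def split_score_with_zero_alt (score : Int) : List Int :=
  (PySem.List.pyRange 0 5 1).map (fun i => max 0 (min 10 (score - 10 * i)))

-- ===== PRECONDITION & SPEC =====
def Spec_split_score_with_zero (score : Int) (out : List Int) : Prop := out = split_score_with_zero_alt score
instance (score : Int) (out : List Int) : Decidable (Spec_split_score_with_zero score out) := by unfold Spec_split_score_with_zero; infer_instance

-- ===== CLAIM (what is proved, stated in full; the proofs are below) =====
def Claim_equal_split_score_with_zero : Prop := ∀ (score : Int), Dom_split_score_with_zero score → Spec_split_score_with_zero score (split_score_with_zero score)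

-- ===== LEMMAS AND PROOFS =====

-- ===== VERDICT (by name: the statement is the Claim_ definition above) =====
lemma pvStepA_def (p : List Int) (r : Int) :
    pvStepA (p, r) =
      if r ≥ 10 then (p ++ [10], r - 10)
      else if r > 0 then (p ++ [r], 0)
      else (p ++ [0], r) := rfl

set_option maxHeartbeats 1000000 in
theorem split_score_with_zero_spec : Claim_equal_split_score_with_zero := by
  intro score _
  unfold Spec_split_score_with_zero
  have hA : split_score_with_zero score =
      (pvStepA (pvStepA (pvStepA (pvStepA (pvStepA ([], score)))))).1 := rfl
  have hB : split_score_with_zero_alt score =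
      [max 0 (min 10 (score - 10 * 0)), max 0 (min 10 (score - 10 * 1)),
       max 0 (min 10 (score - 10 * 2)), max 0 (min 10 (score - 10 * 3)),
       max 0 (min 10 (score - 10 * 4))] := rfl
  rw [hA, hB]
  simp only [pvStepA_def, apply_ite pvStepA, apply_ite Prod.fst]
  split_ifs <;> simp_all <;> omega
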